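-- pv_equiv track=rewrite | github.com/jason831444-web/ApplyPilot | backend/app/services/analysis/evidence.py | nearest_clause_start
-- ===== SOURCE A (Python) =====
-- def nearest_clause_start(sentence: str, match_index: int, max_chars: int) -> int:
--     search_start = max(0, match_index - max_chars // 2)
--     candidates = [
--         sentence.rfind(marker, search_start, match_index)
--         for marker in [". ", "! ", "? ", "; ", ": ", ", "]
--     ]
--     boundary = max(candidates)
--     if boundary >= search_start:
--         return word_left_boundary(sentence, boundary + 2)
--     return word_left_boundary(sentence, search_start)
--
-- def word_left_boundary(text: str, start: int) -> int:
--     start = max(0, min(start, len(text)))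
--     while start > 0 and not text[start - 1].isspace() and text[start - 1] not in ".!?,;:\n":
--         start -= 1
--     return start
-- ===== SOURCE B (Python) =====
-- def nearest_clause_start(sentence: str, match_index: int, max_chars: int) -> int:
--     search_start = max(0, match_index - max_chars // 2)
--     boundary = None
--     p = min(match_index, len(sentence)) - 2
--     while p >= search_start:
--         if sentence[p] in ".!?;:," and sentence[p + 1] == " ":
--             boundary = p
--             break
--         p -= 1
--     if boundary is not None:
--         return word_left_boundary(sentence, boundary + 2)
--     return word_left_boundary(sentence, search_start)
--
-- def word_left_boundary(text: str, start: int) -> int: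
--     start = max(0, min(start, len(text)))
--     while start > 0 and not text[start - 1].isspace() and text[start - 1] not in ".!?,;:\n":
--         start -= 1
--     return start
-- ===== Notes on version B (the rewrite author's own statement) =====
-- stated objective: alternative
-- what changed: B replaces the six per-marker rfind calls plus max() with a single reverse scan from min(match_index, len)-2 down to search_start that stops at the first punctuation-then-space pair.
-- outside the precondition, e.g. on nearest_clause_start('a. b', -1, 0): A returns 3, B returns 0
import Mathlib
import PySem

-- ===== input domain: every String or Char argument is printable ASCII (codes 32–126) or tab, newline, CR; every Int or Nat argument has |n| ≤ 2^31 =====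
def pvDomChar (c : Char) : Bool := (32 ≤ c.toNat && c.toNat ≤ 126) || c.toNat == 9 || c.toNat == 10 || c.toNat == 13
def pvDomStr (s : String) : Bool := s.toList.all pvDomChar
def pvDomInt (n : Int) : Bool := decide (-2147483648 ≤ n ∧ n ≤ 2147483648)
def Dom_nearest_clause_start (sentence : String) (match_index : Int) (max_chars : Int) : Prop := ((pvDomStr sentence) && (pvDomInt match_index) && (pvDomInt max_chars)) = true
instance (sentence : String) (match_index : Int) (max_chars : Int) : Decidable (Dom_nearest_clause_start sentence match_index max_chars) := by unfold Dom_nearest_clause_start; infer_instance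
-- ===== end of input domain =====

-- B replaces A's six per-marker rfind calls plus max() with a single reverse scan for a
-- punctuation-then-space pair; same return value on the natural domain 0 ≤ match_index.

-- ===== PORT A =====
-- shared helper: literal port of word_left_boundary (the while loop is wlb_go on the start index;
-- text[start-1] is always in range because start is clamped to [0, len(text)] first)
def wlb_go (text : List Char) : Nat → Nat
  | 0 => 0
  | k + 1 =>
    let c := text.getD k ' '
    if PySem.Chars.isspace c || (".!?,;:\n".toList).contains c then k + 1
    else wlb_go text k

def word_left_boundary (text : List Char) (start : Int) : Int :=
  let start := max 0 (min start (text.length : Int))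
  ((wlb_go text start.toNat : Nat) : Int)

def nearest_clause_start (sentence : String) (match_index : Int) (max_chars : Int) : Int :=
  let s := sentence.toList
  let search_start := max 0 (match_index - PySem.Int.floordiv max_chars 2)
  let candidates := [". ", "! ", "? ", "; ", ": ", ", "].map
      (fun m => PySem.Chars.rfindFrom s m.toList search_start (some match_index))
  -- max(candidates): candidates is a literal 6-element list, so max? is never none
  let boundary := (PySem.List.max? candidates id).getD (-1)
  if boundary ≥ search_start then word_left_boundary s (boundary + 2)
  else word_left_boundary s search_start

-- ===== PORT B =====
-- the while loop of B: scan p downwards from its start value until a hit or p < search_start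
def ncs_scan (s : List Char) (search_start : Int) (p : Int) : Option Int :=
  if h : p ≥ search_start then
    if (".!?;:,".toList).contains (s.getD p.toNat ' ') && (s.getD (p.toNat + 1) ' ' == ' ')
    then some p
    else ncs_scan s search_start (p - 1)
  else none
termination_by (p - search_start + 1).toNat
decreasing_by omega

def nearest_clause_start_alt (sentence : String) (match_index : Int) (max_chars : Int) : Int :=
  let s := sentence.toList
  let search_start := max 0 (match_index - PySem.Int.floordiv max_chars 2)
  match ncs_scan s search_start (min match_index (s.length : Int) - 2) with
  | some boundary => word_left_boundary s (boundary + 2)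
  | none => word_left_boundary s search_start

-- ===== PRECONDITION & SPEC =====
-- Pre_ restricts to the natural domain 0 ≤ match_index (a match index is a position in the
-- string): for negative match_index A's value comes from rfind's negative-end wraparound,
-- which B's scan has no reason to reproduce.
def Pre_nearest_clause_start (sentence : String) (match_index : Int) (max_chars : Int) : Prop :=
  0 ≤ match_index
instance (sentence : String) (match_index : Int) (max_chars : Int) : Decidable (Pre_nearest_clause_start sentence match_index max_chars) := by unfold Pre_nearest_clause_start; infer_instance

def pvWitness_nearest_clause_start : String × Int × Int := ("a, b", 3, 4)

def Spec_nearest_clause_start (sentence : String) (match_index : Int) (max_chars : Int) (out : Int) : Prop := out = nearest_clause_start_alt sentence match_index max_chars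
instance (sentence : String) (match_index : Int) (max_chars : Int) (out : Int) : Decidable (Spec_nearest_clause_start sentence match_index max_chars out) := by unfold Spec_nearest_clause_start; infer_instance

-- ===== CLAIM (what is proved, stated in full; the proofs are below) =====
def Claim_equal_nearest_clause_start : Prop := ∀ (sentence : String) (match_index : Int) (max_chars : Int), Dom_nearest_clause_start sentence match_index max_chars → Pre_nearest_clause_start sentence match_index max_chars → Spec_nearest_clause_start sentence match_index max_chars (nearest_clause_start sentence match_index max_chars)

-- ===== LEMMAS AND PROOFS =====

-- a "clause boundary hit" at index q of s: one of the six punctuation marks followed by a space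
def Hit (s : List Char) (q : Nat) : Prop :=
  ∃ c ∈ (".!?;:,".toList), s[q]? = some c ∧ s[q + 1]? = some ' '

-- [c, d] is a prefix of u iff u starts with those two characters
lemma pair_prefix_iff (u : List Char) (c d : Char) :
    [c, d] <+: u ↔ u[0]? = some c ∧ u[1]? = some d := by
  constructor
  · rintro ⟨t, rfl⟩; simp
  · rintro ⟨h0, h1⟩
    match u with
    | [] => simp at h0
    | [a] => simp at h1
    | a :: b :: t =>
      simp at h0 h1
      exact ⟨t, by simp [h0, h1]⟩

-- rfind.go bounds and characterization
lemma rfind_go_cases (t sub : List Char) (k : Nat) :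
    PySem.Chars.rfind.go t sub k = -1 ∨
      ∃ i : Nat, i ≤ k ∧ PySem.Chars.rfind.go t sub k = (i : Int) ∧ sub <+: t.drop i := by
  induction k with
  | zero =>
    simp only [PySem.Chars.rfind.go]
    split
    next h => exact Or.inr ⟨0, le_refl _, rfl, by simpa [List.isPrefixOf_iff_prefix] using h⟩
    next h => exact Or.inl rfl
  | succ j ih =>
    simp only [PySem.Chars.rfind.go]
    split
    next hpp => exact Or.inr ⟨j + 1, le_refl _, by push_cast; ring_nf, by simpa [List.isPrefixOf_iff_prefix] using hpp⟩
    next hpp =>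
      rcases ih with h | ⟨i, hi, he, hp⟩
      exact Or.inl h
      exact Or.inr ⟨i, by omega, he, hp⟩

lemma rfind_go_ub (t sub : List Char) (k i : Nat) (hik : i ≤ k) (hp : sub <+: t.drop i) :
    (i : Int) ≤ PySem.Chars.rfind.go t sub k := by
  induction k with
  | zero =>
    have : i = 0 := by omega
    subst this
    simp only [PySem.Chars.rfind.go]
    rw [if_pos (by simpa [List.isPrefixOf_iff_prefix] using hp)]
    simp
  | succ j ih =>
    simp only [PySem.Chars.rfind.go]
    by_cases hi : i = j + 1
    · subst hi
      rw [if_pos (by simpa [List.isPrefixOf_iff_prefix] using hp)]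
    · have := ih (by omega)
      split
      · omega
      · exact this

lemma take_drop_pair (s : List Char) (e' j : Nat) (c : Char) :
    [c, ' '] <+: (s.take e').drop j ↔ j + 2 ≤ e' ∧ s[j]? = some c ∧ s[j + 1]? = some ' ' := by
  rw [pair_prefix_iff]
  simp only [List.getElem?_drop, List.getElem?_take, Nat.add_zero]
  constructor
  · rintro ⟨h0, h1⟩
    split at h0 <;> split at h1 <;> simp_all <;> omega
  · rintro ⟨h2, h0, h1⟩
    rw [if_pos (by omega), if_pos (by omega)]
    exact ⟨h0, h1⟩

-- unfolding of rfindFrom with an explicit end bound (definitional)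
lemma rfindFrom_some_raw (s sub : List Char) (ss mi : Int) :
    PySem.Chars.rfindFrom s sub ss (some mi) =
      (if (if (s.length : Int) < mi then (s.length : Int)
           else if mi < 0 then (if mi + (s.length : Int) < 0 then 0 else mi + (s.length : Int)) else mi)
          < (if ss < 0 then (if ss + (s.length : Int) < 0 then 0 else ss + (s.length : Int)) else ss) then -1
       else if PySem.Chars.rfind ((List.take (if (s.length : Int) < mi then (s.length : Int)
           else if mi < 0 then (if mi + (s.length : Int) < 0 then 0 else mi + (s.length : Int)) else mi).toNat s).drop
           (if ss < 0 then (if ss + (s.length : Int) < 0 then 0 else ss + (s.length : Int)) else ss).toNat) sub = -1 then -1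
       else (if ss < 0 then (if ss + (s.length : Int) < 0 then 0 else ss + (s.length : Int)) else ss) +
         PySem.Chars.rfind ((List.take (if (s.length : Int) < mi then (s.length : Int)
           else if mi < 0 then (if mi + (s.length : Int) < 0 then 0 else mi + (s.length : Int)) else mi).toNat s).drop
           (if ss < 0 then (if ss + (s.length : Int) < 0 then 0 else ss + (s.length : Int)) else ss).toNat) sub) := rfl

-- full characterization of one of A's rfind candidates, for marker [c, ' ']
lemma cand_spec (s : List Char) (c : Char) (ss mi : Int) (hss : 0 ≤ ss) (hmi : 0 ≤ mi) :
    (PySem.Chars.rfindFrom s [c, ' '] ss (some mi) = -1 ∨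
      ∃ p : Nat, PySem.Chars.rfindFrom s [c, ' '] ss (some mi) = (p : Int) ∧
        ss ≤ (p : Int) ∧ (p : Int) + 2 ≤ min mi (s.length : Int) ∧
        s[p]? = some c ∧ s[p + 1]? = some ' ') ∧
    (∀ p : Nat, ss ≤ (p : Int) → (p : Int) + 2 ≤ min mi (s.length : Int) →
      s[p]? = some c → s[p + 1]? = some ' ' →
      (p : Int) ≤ PySem.Chars.rfindFrom s [c, ' '] ss (some mi)) := by
  have hmi' : ¬ mi < 0 := by omega
  have hss' : ¬ ss < 0 := by omega
  rw [rfindFrom_some_raw, if_neg hmi', if_neg hss']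
  have hEmin : (if (s.length : Int) < mi then (s.length : Int) else mi) = min mi (s.length : Int) := by
    split_ifs <;> omega
  rw [hEmin]
  simp only [PySem.Chars.rfind]
  set M := min mi (s.length : Int) with hM
  have hM0 : 0 ≤ M := by omega
  have hMlen : M ≤ (s.length : Int) := min_le_right _ _
  set t := (List.take M.toNat s).drop ss.toNat with ht
  have htlen : t.length = M.toNat - ss.toNat := by
    rw [ht]; simp only [List.length_drop, List.length_take]; omega
  by_cases hlt : M < ss
  · rw [if_pos hlt]
    refine ⟨Or.inl rfl, ?_⟩
    intro p hp1 hp2 _ _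
    omega
  · rw [if_neg hlt]
    constructor
    · rcases rfind_go_cases t [c, ' '] t.length with hgo | ⟨i, hi, hgo, hp⟩
      · rw [hgo]; simp
      · rw [hgo]
        rw [if_neg (by omega : ¬ ((i : Int) = -1))]
        have hkey := (take_drop_pair s M.toNat (ss.toNat + i) c).mp (by
          rw [← List.drop_drop]; exact hp)
        exact Or.inr ⟨ss.toNat + i, by omega, by omega, by omega, hkey.2.1, hkey.2.2⟩
    · intro p hp1 hp2 hc hsp
      have hple : p + 2 ≤ M.toNat := by omega
      have hpfx : [c, ' '] <+: t.drop (p - ss.toNat) := by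
        rw [ht, List.drop_drop]
        rw [(by omega : ss.toNat + (p - ss.toNat) = p)]
        exact (take_drop_pair s M.toNat p c).mpr ⟨hple, hc, hsp⟩
      have hub := rfind_go_ub t [c, ' '] t.length (p - ss.toNat) (by omega) hpfx
      rw [if_neg (by omega : ¬ (PySem.Chars.rfind.go t [c, ' '] t.length = -1))]
      omega

-- B's hit test, on an in-range index, is exactly Hit
lemma hitB_iff (s : List Char) (q : Nat) (h : q + 1 < s.length) :
    (((".!?;:,".toList).contains (s.getD q ' ') && (s.getD (q + 1) ' ' == ' ')) = true) ↔ Hit s q := by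
  have h0 : q < s.length := by omega
  rw [List.getD_eq_getElem?_getD, List.getD_eq_getElem?_getD,
      List.getElem?_eq_getElem h0, List.getElem?_eq_getElem h]
  unfold Hit
  simp only [Option.getD_some, Bool.and_eq_true, beq_iff_eq, List.contains_iff_mem]
  constructor
  · rintro ⟨hc, hsp⟩
    exact ⟨s[q], hc, List.getElem?_eq_getElem h0, by rw [List.getElem?_eq_getElem h, hsp]⟩
  · rintro ⟨d, hd, hq, hq1⟩
    rw [List.getElem?_eq_getElem h0] at hq
    rw [List.getElem?_eq_getElem h] at hq1
    simp only [Option.some.injEq] at hq hq1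
    exact ⟨hq ▸ hd, hq1⟩

-- the reverse scan finds the greatest Hit index in [search_start, p], or none
lemma scan_spec (s : List Char) (ss : Int) (hss : 0 ≤ ss) :
    ∀ (n : Nat) (p : Int), (p - ss + 1).toNat ≤ n → p ≤ (s.length : Int) - 2 →
    (ncs_scan s ss p = none ∧ ∀ q : Nat, ss ≤ (q : Int) → (q : Int) ≤ p → ¬ Hit s q) ∨
    (∃ b : Nat, ncs_scan s ss p = some (b : Int) ∧ ss ≤ (b : Int) ∧ (b : Int) ≤ p ∧ Hit s b ∧
      ∀ q : Nat, (b : Int) < (q : Int) → (q : Int) ≤ p → ¬ Hit s q) := by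
  intro n
  induction n with
  | zero =>
    intro p hn hp
    left
    constructor
    · rw [ncs_scan]; rw [dif_neg (by omega)]
    · intro q h1 h2 _; omega
  | succ n ih =>
    intro p hn hp
    by_cases hpss : ss ≤ p
    · have hp0 : 0 ≤ p := by omega
      have hrange : p.toNat + 1 < s.length := by omega
      rw [ncs_scan, dif_pos (by omega : p ≥ ss)]
      by_cases hhit : ((".!?;:,".toList).contains (s.getD p.toNat ' ') && (s.getD (p.toNat + 1) ' ' == ' ')) = true
      · rw [if_pos hhit]
        right
        exact ⟨p.toNat, by rw [Int.toNat_of_nonneg hp0], by omega, by omega,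
          (hitB_iff s p.toNat hrange).mp hhit, fun q h1 h2 _ => by omega⟩
      · rw [if_neg hhit]
        have hnotp : ¬ Hit s p.toNat := fun hh => hhit ((hitB_iff s p.toNat hrange).mpr hh)
        rcases ih (p - 1) (by omega) (by omega) with ⟨he, hno⟩ | ⟨b, he, h1, h2, h3, h4⟩
        · left
          refine ⟨he, ?_⟩
          intro q hq1 hq2 hq3
          by_cases hqp : (q : Int) ≤ p - 1
          · exact hno q hq1 hqp hq3
          · have hqe : q = p.toNat := by omega
            exact hnotp (hqe ▸ hq3)
        · right
          refine ⟨b, he, h1, by omega, h3, ?_⟩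
          intro q hq1 hq2 hq3
          by_cases hqp : (q : Int) ≤ p - 1
          · exact h4 q hq1 hqp hq3
          · have hqe : q = p.toNat := by omega
            exact hnotp (hqe ▸ hq3)
    · left
      constructor
      · rw [ncs_scan]; rw [dif_neg (by omega)]
      · intro q h1 h2 _; omega

lemma toList_dot : (". ").toList = ['.', ' '] := rfl
lemma toList_bang : ("! ").toList = ['!', ' '] := rfl
lemma toList_qm : ("? ").toList = ['?', ' '] := rfl
lemma toList_semi : ("; ").toList = [';', ' '] := rfl
lemma toList_colon : (": ").toList = [':', ' '] := rfl
lemma toList_comma : (", ").toList = [',', ' '] := rfl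
lemma toList_puncts : (".!?;:,").toList = ['.', '!', '?', ';', ':', ','] := rfl

theorem nearest_clause_start_spec : Claim_equal_nearest_clause_start := by
  intro sentence mi mc _ hpre
  unfold Spec_nearest_clause_start
  have hmi : 0 ≤ mi := hpre
  simp only [nearest_clause_start, nearest_clause_start_alt, List.map_cons, List.map_nil,
    toList_dot, toList_bang, toList_qm, toList_semi, toList_colon, toList_comma]
  set s := sentence.toList with hs
  set ss := max 0 (mi - PySem.Int.floordiv mc 2) with hssdef
  have hss : 0 ≤ ss := by omega
  set M := min mi (s.length : Int) with hMdef
  have hM0 : 0 ≤ M := by omega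
  have hMlen : M ≤ (s.length : Int) := min_le_right _ _
  set cands := [PySem.Chars.rfindFrom s ['.', ' '] ss (some mi),
    PySem.Chars.rfindFrom s ['!', ' '] ss (some mi),
    PySem.Chars.rfindFrom s ['?', ' '] ss (some mi),
    PySem.Chars.rfindFrom s [';', ' '] ss (some mi),
    PySem.Chars.rfindFrom s [':', ' '] ss (some mi),
    PySem.Chars.rfindFrom s [',', ' '] ss (some mi)] with hcands
  have hCA : ∀ x ∈ cands, x = -1 ∨
      ∃ p : Nat, x = (p : Int) ∧ ss ≤ (p : Int) ∧ (p : Int) + 2 ≤ M ∧ Hit s p := by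
    intro x hx
    rw [hcands] at hx
    simp only [List.mem_cons, List.not_mem_nil, or_false] at hx
    rcases hx with h | h | h | h | h | h <;> subst h
    · rcases (cand_spec s '.' ss mi hss hmi).1 with h1 | ⟨p, h1, h2, h3, h4, h5⟩
      · exact Or.inl h1
      · exact Or.inr ⟨p, h1, h2, h3, ⟨'.', by decide, h4, h5⟩⟩
    · rcases (cand_spec s '!' ss mi hss hmi).1 with h1 | ⟨p, h1, h2, h3, h4, h5⟩
      · exact Or.inl h1
      · exact Or.inr ⟨p, h1, h2, h3, ⟨'!', by decide, h4, h5⟩⟩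
    · rcases (cand_spec s '?' ss mi hss hmi).1 with h1 | ⟨p, h1, h2, h3, h4, h5⟩
      · exact Or.inl h1
      · exact Or.inr ⟨p, h1, h2, h3, ⟨'?', by decide, h4, h5⟩⟩
    · rcases (cand_spec s ';' ss mi hss hmi).1 with h1 | ⟨p, h1, h2, h3, h4, h5⟩
      · exact Or.inl h1
      · exact Or.inr ⟨p, h1, h2, h3, ⟨';', by decide, h4, h5⟩⟩
    · rcases (cand_spec s ':' ss mi hss hmi).1 with h1 | ⟨p, h1, h2, h3, h4, h5⟩
      · exact Or.inl h1
      · exact Or.inr ⟨p, h1, h2, h3, ⟨':', by decide, h4, h5⟩⟩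
    · rcases (cand_spec s ',' ss mi hss hmi).1 with h1 | ⟨p, h1, h2, h3, h4, h5⟩
      · exact Or.inl h1
      · exact Or.inr ⟨p, h1, h2, h3, ⟨',', by decide, h4, h5⟩⟩
  have hCB : ∀ p : Nat, ss ≤ (p : Int) → (p : Int) + 2 ≤ M → Hit s p →
      ∃ x ∈ cands, (p : Int) ≤ x := by
    intro p h1 h2 hh
    rcases hh with ⟨c, hc, h4, h5⟩
    rw [toList_puncts] at hc
    simp only [List.mem_cons, List.not_mem_nil, or_false] at hc
    rcases hc with rfl | rfl | rfl | rfl | rfl | rfl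
    · exact ⟨_, by rw [hcands]; simp,
        (cand_spec s '.' ss mi hss hmi).2 p h1 h2 h4 h5⟩
    · exact ⟨_, by rw [hcands]; simp,
        (cand_spec s '!' ss mi hss hmi).2 p h1 h2 h4 h5⟩
    · exact ⟨_, by rw [hcands]; simp,
        (cand_spec s '?' ss mi hss hmi).2 p h1 h2 h4 h5⟩
    · exact ⟨_, by rw [hcands]; simp,
        (cand_spec s ';' ss mi hss hmi).2 p h1 h2 h4 h5⟩
    · exact ⟨_, by rw [hcands]; simp,
        (cand_spec s ':' ss mi hss hmi).2 p h1 h2 h4 h5⟩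
    · exact ⟨_, by rw [hcands]; simp,
        (cand_spec s ',' ss mi hss hmi).2 p h1 h2 h4 h5⟩
  -- the maximum of the candidates
  obtain ⟨m, hm⟩ : ∃ m, PySem.List.max? cands id = some m := by
    rcases h : PySem.List.max? cands id with _ | m
    · rw [PySem.List.max?_eq_none_iff] at h; rw [hcands] at h; simp at h
    · exact ⟨m, rfl⟩
  have hmmem : m ∈ cands := PySem.List.max?_mem hm
  have hmub : ∀ x ∈ cands, x ≤ m := by
    intro x hx; exact PySem.List.max?_isMax hm x hx
  rw [hm]
  simp only [Option.getD_some]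
  -- B's scan
  rcases scan_spec s ss hss (M - ss + 1).toNat.succ (M - 2) (by omega) (by omega) with
    ⟨hnone, hno⟩ | ⟨b, hsome, hbss, hble, hhit, hmaxb⟩
  · have hnge : ¬ m ≥ ss := by
      intro hge
      rcases hCA m hmmem with rfl | ⟨p, rfl, hp1, hp2, hp3⟩
      · omega
      · exact hno p hp1 (by omega) hp3
    rw [hnone, if_neg hnge]
  · obtain ⟨x, hxmem, hxge⟩ := hCB b hbss (by omega) hhit
    have hmb : (b : Int) ≤ m := le_trans hxge (hmub x hxmem)
    have hge : m ≥ ss := by omega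
    rcases hCA m hmmem with rfl | ⟨p, rfl, hp1, hp2, hp3⟩
    · omega
    · have hpb : p = b := by
        by_contra hne
        have hblt : (b : Int) < (p : Int) := by omega
        exact hmaxb p hblt (by omega) hp3
      rw [hsome, if_pos hge, hpb]
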